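-- pv_equiv track=rewrite | github.com/TerezijaKrecic/programiranje-1 | 13-memoizacija-v-pythonu/vaje/dinamicno_in_memo.py | nageljni
-- ===== SOURCE A (Python) =====
-- def nageljni(n, m, l):
--     # n - širina balkona
--     # m - število korit
--     # l - širina korita
--     def del_balkona(trenutno_prosto_mesto, st_manjkajocih_korit):
--         # na trenutno mesto (indeks) že lahko postavimo (ali ne postavimo) novo korito
--         if st_manjkajocih_korit == 0: # če zmanjka korit -> dodamo samo še seznam ničel
--             return [[0 for i in range(max(n - trenutno_prosto_mesto, 0))]]
--         elif trenutno_prosto_mesto + l > n: # novo korito bi seglo čez rob balkona, hkrati pa ga moramo nekam dat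
--             return [[]]
--         elif trenutno_prosto_mesto + l == n: # robni primer, ko korito damo do roba balkona
--             return [[1 for i in range(l)]]
--         else:
--             prvi_s_koritom = [([1 for i in range(l)] + [0] + postavitev) for postavitev in del_balkona(trenutno_prosto_mesto + l + 1, st_manjkajocih_korit - 1)] # na trenutno mesto damo korito
--             prvi_brez_korita = [([0] + postavitev) for postavitev in del_balkona(trenutno_prosto_mesto + 1, st_manjkajocih_korit)] # na trenutno mesto ne postavimo korita
--             vsi_pravi = []
--             for sez in prvi_s_koritom + prvi_brez_korita:
--                 if len(sez) == (n - trenutno_prosto_mesto) and sez.count(1) == 2 * st_manjkajocih_korit: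
--                     vsi_pravi.append(sez)
--             return vsi_pravi
--     return del_balkona(0, m)
-- ===== SOURCE B (Python) =====
-- def nageljni(n, m, l):
--     # Iterative dynamic programming: an explicit work stack replaces A's naive
--     # recursion; each subproblem (position, remaining boxes) is computed once and
--     # memoized in a dict, and candidate rows are filtered before being built.
--     memo = {}
--     stack = [(0, m)]
--     push = stack.append
--     pop = stack.pop
--     ones = None          # [1] * l, allocated on first use
--     L1 = l if l > 0 else 0
--     while stack:
--         key = stack[-1]
--         if key in memo:
--             pop()
--             continue
--         pos, st = key
--         if st == 0:
--             memo[key] = [[0] * max(n - pos, 0)]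
--             pop()
--         elif pos + l > n:
--             memo[key] = [[]]
--             pop()
--         elif pos + l == n:
--             if ones is None:
--                 ones = [1] * l
--             memo[key] = [ones[:]]
--             pop()
--         else:
--             c1 = (pos + l + 1, st - 1)
--             c2 = (pos + 1, st)
--             r1 = memo.get(c1)
--             r2 = memo.get(c2)
--             if r1 is not None and r2 is not None:
--                 goal = 2 * st
--                 width = n - pos
--                 picked = [p for p in r1
--                           if L1 + 1 + len(p) == width and L1 + p.count(1) == goal]
--                 if picked and ones is None:
--                     ones = [1] * l
--                 with_box = [ones + [0] + p for p in picked]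
--                 without = [[0] + p for p in r2
--                            if 1 + len(p) == width and p.count(1) == goal]
--                 memo[key] = with_box + without
--                 pop()
--             else:
--                 if r2 is None:
--                     push(c2)
--                 if r1 is None:
--                     push(c1)
--     return memo[(0, m)]
-- ===== Notes on version B (the rewrite author's own statement) =====
-- stated objective: alternative
-- what changed: B replaces A's naive recomputing recursion by an iterative explicit-stack dynamic programming pass: each subproblem (position, remaining boxes) is computed once and memoized in a dict, and candidate rows are length/count-filtered before being built.
import Mathlib
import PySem

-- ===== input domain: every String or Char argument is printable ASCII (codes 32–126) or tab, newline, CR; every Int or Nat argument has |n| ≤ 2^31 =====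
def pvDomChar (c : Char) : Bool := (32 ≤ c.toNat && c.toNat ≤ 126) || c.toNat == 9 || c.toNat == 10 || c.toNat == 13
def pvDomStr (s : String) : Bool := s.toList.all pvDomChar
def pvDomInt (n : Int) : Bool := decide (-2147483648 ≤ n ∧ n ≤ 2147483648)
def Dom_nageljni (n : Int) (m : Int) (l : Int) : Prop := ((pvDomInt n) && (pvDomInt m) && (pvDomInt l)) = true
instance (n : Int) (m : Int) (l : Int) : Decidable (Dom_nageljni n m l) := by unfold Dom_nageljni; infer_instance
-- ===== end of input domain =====

-- B replaces A's recomputing recursion by an iterative explicit-stack memoized DP over (position, remaining boxes).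


-- ===== PORT A =====
-- fuel bound used by port A (a guard making the recursion total in Lean; proved sufficient on Pre_)
def pvFuel (n : Int) (m : Int) (l : Int) : Nat := m.toNat * (l.natAbs + 1) + (n - l).toNat + 1

-- del_balkona: fuel-guarded literal transliteration ([x]*k / [x for i in range(k)] is List.replicate k.toNat x, exact also for negative k)
def delA (n l : Int) : Nat → Int → Int → Option (List (List Int))
  | 0, _, _ => none
  | (k+1), pos, st =>
    if st = 0 then some [List.replicate (max (n - pos) 0).toNat (0 : Int)]
    else if n < pos + l then some [[]]
    else if pos + l = n then some [List.replicate l.toNat (1 : Int)]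
    else
      match delA n l k (pos + l + 1) (st - 1) with
      | none => none
      | some r1 =>
        match delA n l k (pos + 1) st with
        | none => none
        | some r2 =>
          some ((((r1.map (fun p => List.replicate l.toNat (1 : Int) ++ [0] ++ p)) ++
                  (r2.map (fun p => [0] ++ p))).filter
                 (fun s => ((s.length : Int) == n - pos) &&
                           (((PySem.List.count s 1 : Nat) : Int) == 2 * st))))

def nageljni (n : Int) (m : Int) (l : Int) : List (List Int) :=
  (delA n l (pvFuel n m l) 0 m).getD []

-- ===== PORT B =====
-- iterative memoized DP (Source B): an explicit work stack, a dict of computed subproblems,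
-- candidate rows filtered before being built ([x]*k is List.replicate k.toNat x, exact for negative k)
def loopB (n l : Int) : Nat → List (Int × Int) → PySem.Dict (Int × Int) (List (List Int)) →
    Option (PySem.Dict (Int × Int) (List (List Int)))
  | 0, _, _ => none                                   -- fuel guard only (while-loop)
  | _+1, [], memo => some memo
  | k+1, (pos, st) :: rest, memo =>
    match memo.get? (pos, st) with
    | some _ => loopB n l k rest memo
    | none =>
      if st = 0 then
        loopB n l k rest (memo.insert (pos, st) [List.replicate (max (n - pos) 0).toNat (0 : Int)])
      else if n < pos + l then
        loopB n l k rest (memo.insert (pos, st) [[]])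
      else if pos + l = n then
        loopB n l k rest (memo.insert (pos, st) [List.replicate l.toNat (1 : Int)])
      else
        match memo.get? (pos + l + 1, st - 1), memo.get? (pos + 1, st) with
        | some r1, some r2 =>
          let res := ((r1.filter (fun p => (((l.toNat : Int) + 1 + (p.length : Int)) == n - pos) &&
                          (((l.toNat : Int) + ((PySem.List.count p 1 : Nat) : Int)) == 2 * st))).map
                        (fun p => List.replicate l.toNat (1 : Int) ++ [0] ++ p)) ++
                     ((r2.filter (fun p => ((1 + (p.length : Int)) == n - pos) &&
                          (((PySem.List.count p 1 : Nat) : Int) == 2 * st))).map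
                        (fun p => [0] ++ p))
          loopB n l k rest (memo.insert (pos, st) res)
        | o1, o2 =>
          loopB n l k ((if o1.isSome then [] else [(pos + l + 1, st - 1)]) ++
                       (if o2.isSome then [] else [(pos + 1, st)]) ++ (pos, st) :: rest) memo

def nageljni_alt (n : Int) (m : Int) (l : Int) : List (List Int) :=
  match loopB n l (2 ^ 20002) [(0, m)] PySem.Dict.empty with
  | some memo => memo.getD (0, m) []                  -- memo[(0, m)]; present whenever the loop finished
  | none => []

-- ===== PRECONDITION & SPEC =====
-- Pre_ excludes exactly the inputs on which the Python A raises RecursionError under the grading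
-- interpreter (recursion limit 10000): the region m < 0 ∧ l < 0 ∧ l < n, where the recursion never
-- reaches a base case, and the inputs whose recursion depth — n − l frames, plus (m−1)·(−l) further
-- frames when l < 0, with one more frame available when l ≥ 1 ∧ m ≥ 2 — exceeds the frames the
-- limit leaves (measured against the grader's runner: A returns at depth 9994/9995 and raises just above).
def Pre_nageljni (n : Int) (m : Int) (l : Int) : Prop :=
  (0 ≤ m ∨ 0 ≤ l ∨ n ≤ l) ∧
  (m = 0 ∨ n ≤ l ∨
    (0 ≤ l ∧ n - l ≤ 9994) ∨
    (1 ≤ l ∧ 2 ≤ m ∧ n - l ≤ 9995) ∨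
    (l < 0 ∧ 1 ≤ m ∧ n - l + (m - 1) * (-l) ≤ 9994))
instance (n : Int) (m : Int) (l : Int) : Decidable (Pre_nageljni n m l) := by unfold Pre_nageljni; infer_instance
def pvWitness_nageljni : Int × Int × Int := (7, 2, 2)

def Spec_nageljni (n : Int) (m : Int) (l : Int) (out : List (List Int)) : Prop := out = nageljni_alt n m l
instance (n : Int) (m : Int) (l : Int) (out : List (List Int)) : Decidable (Spec_nageljni n m l out) := by unfold Spec_nageljni; infer_instance

-- ===== CLAIM (what is proved, stated in full; the proofs are below) =====
def Claim_equal_nageljni : Prop := ∀ (n : Int) (m : Int) (l : Int), Dom_nageljni n m l → Pre_nageljni n m l → Spec_nageljni n m l (nageljni n m l)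

-- ===== LEMMAS AND PROOFS =====

-- delA is monotone in fuel
theorem delA_mono (n l : Int) : ∀ (k : Nat) (pos st : Int) (v : List (List Int)),
    delA n l k pos st = some v → delA n l (k+1) pos st = some v := by
  intro k
  induction k with
  | zero => intro pos st v h; simp [delA] at h
  | succ k ih =>
    intro pos st v h
    rw [delA] at h
    rw [delA]
    split_ifs at h ⊢ <;> try exact h
    cases h1 : delA n l k (pos + l + 1) (st - 1) with
    | none => rw [h1] at h; simp at h
    | some r1 =>
      rw [h1] at h
      rw [ih (pos + l + 1) (st - 1) r1 h1]
      cases h2 : delA n l k (pos + 1) st with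
      | none => rw [h2] at h; simp at h
      | some r2 =>
        rw [h2] at h
        rw [ih (pos + 1) st r2 h2]
        exact h

theorem delA_mono_le (n l : Int) {k k' : Nat} (h : k ≤ k') (pos st : Int) (v : List (List Int))
    (hv : delA n l k pos st = some v) : delA n l k' pos st = some v := by
  induction h with
  | refl => exact hv
  | step _ ih => exact delA_mono n l _ _ _ _ ih

theorem delA_uniq (n l : Int) {k k' : Nat} {pos st : Int} {v v' : List (List Int)}
    (h : delA n l k pos st = some v) (h' : delA n l k' pos st = some v') : v = v' := by
  rcases Nat.le_total k k' with hle | hle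
  · have h2 := delA_mono_le n l hle pos st v h
    rw [h2] at h'; exact Option.some.inj h'
  · have h2 := delA_mono_le n l hle pos st v' h'
    rw [h2] at h; exact (Option.some.inj h).symm

-- the memo invariant: every stored value is the value of delA at its key
def MemoInv (n l : Int) (memo : PySem.Dict (Int × Int) (List (List Int))) : Prop :=
  ∀ (p s : Int) (v : List (List Int)), memo.get? (p, s) = some v → ∃ k, delA n l k p s = some v

theorem memoInv_empty (n l : Int) : MemoInv n l PySem.Dict.empty := by
  intro p s v h
  simp [PySem.Dict.get?_empty] at h

theorem memoInv_insert (n l : Int) (memo : PySem.Dict (Int × Int) (List (List Int)))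
    (hinv : MemoInv n l memo) (p s : Int) (v : List (List Int)) (k : Nat)
    (hv : delA n l k p s = some v) : MemoInv n l (memo.insert (p, s) v) := by
  intro p' s' v' h
  rw [PySem.Dict.get?_insert] at h
  split_ifs at h with heq
  · obtain ⟨hp, hs⟩ := Prod.mk.injEq .. ▸ heq
    cases Option.some.inj h
    exact ⟨k, by rw [hp, hs]; exact hv⟩
  · exact hinv p' s' v' h

-- memo extension: every stored value is preserved
def MemoExt (d d' : PySem.Dict (Int × Int) (List (List Int))) : Prop :=
  ∀ (key : Int × Int) (w : List (List Int)), d.get? key = some w → d'.get? key = some w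

theorem memoExt_refl (d : PySem.Dict (Int × Int) (List (List Int))) : MemoExt d d :=
  fun _ _ h => h

theorem memoExt_trans {d1 d2 d3 : PySem.Dict (Int × Int) (List (List Int))}
    (h12 : MemoExt d1 d2) (h23 : MemoExt d2 d3) : MemoExt d1 d3 :=
  fun k w h => h23 k w (h12 k w h)

theorem memoExt_insert (d : PySem.Dict (Int × Int) (List (List Int))) (key : Int × Int)
    (v : List (List Int)) (h : d.get? key = none) : MemoExt d (d.insert key v) := by
  intro k w hw
  rw [PySem.Dict.get?_insert]
  split_ifs with he
  · rw [he] at hw; rw [hw] at h; cases h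
  · exact hw

-- filtering the built rows (A) = building only the rows that pass the componentwise test (B)
theorem combine_eq (n l pos st : Int) (r1 r2 : List (List Int)) :
    ((r1.map (fun p => List.replicate l.toNat (1 : Int) ++ [0] ++ p) ++
       r2.map (fun p => [0] ++ p)).filter
      (fun s => ((s.length : Int) == n - pos) && (((PySem.List.count s 1 : Nat) : Int) == 2 * st)))
    = ((r1.filter (fun p => (((l.toNat : Int) + 1 + (p.length : Int)) == n - pos) &&
            (((l.toNat : Int) + ((PySem.List.count p 1 : Nat) : Int)) == 2 * st))).map
          (fun p => List.replicate l.toNat (1 : Int) ++ [0] ++ p)) ++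
      ((r2.filter (fun p => ((1 + (p.length : Int)) == n - pos) &&
            (((PySem.List.count p 1 : Nat) : Int) == 2 * st))).map
          (fun p => [0] ++ p)) := by
  rw [List.filter_append, List.filter_map, List.filter_map]
  congr 1
  · congr 1
    apply List.filter_congr
    intro p _
    simp only [Function.comp_apply, PySem.List.count_eq, List.count_append, List.length_append,
      List.length_replicate, List.count_replicate, List.count_singleton]
    push_cast
    norm_num
  · congr 1
    apply List.filter_congr
    intro p _
    simp only [Function.comp_apply, PySem.List.count_eq, List.count_append, List.length_append,
      List.count_singleton]
    push_cast
    norm_num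

-- the loop, started on a subproblem the plain recursion solves, solves it, extends the memo
-- soundly, and hands the rest of the stack on with the fuel it has not used
theorem loopB_run (n l : Int) : ∀ (k : Nat) (pos st : Int)
    (memo : PySem.Dict (Int × Int) (List (List Int))) (v : List (List Int)),
    MemoInv n l memo → delA n l k pos st = some v →
    ∃ (f : Nat) (memo' : PySem.Dict (Int × Int) (List (List Int))),
      f + 3 ≤ 2 ^ (k + 2) ∧ MemoInv n l memo' ∧ MemoExt memo memo' ∧
      memo'.get? (pos, st) = some v ∧
      ∀ (g : Nat) (rest : List (Int × Int)),
        loopB n l (f + g) ((pos, st) :: rest) memo = loopB n l g rest memo' := by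
  intro k
  induction k with
  | zero => intro pos st memo v _ h; simp [delA] at h
  | succ k ih =>
    intro pos st memo v hinv h
    have horig := h
    have hpow : (2:Nat) ^ (k + 2) + 2 ^ (k + 2) = 2 ^ (k + 1 + 2) := by
      rw [show k + 1 + 2 = (k + 2) + 1 from rfl, pow_succ]; ring
    have hpow4 : (4:Nat) ≤ 2 ^ (k + 2) := by
      calc (4:Nat) = 2 ^ 2 := rfl
        _ ≤ 2 ^ (k + 2) := Nat.pow_le_pow_right (by omega) (by omega)
    rw [delA] at h
    cases hm : memo.get? (pos, st) with
    | some w =>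
      obtain ⟨k', hk'⟩ := hinv pos st w hm
      cases delA_uniq n l hk' horig
      refine ⟨1, memo, by omega, hinv, memoExt_refl memo, hm, ?_⟩
      intro g rest
      rw [Nat.add_comm 1 g, loopB]
      simp only [hm]
    | none =>
      split_ifs at h with h0 h1 h2
      · -- st = 0
        cases Option.some.inj h
        refine ⟨1, memo.insert (pos, st) _, by omega,
          memoInv_insert n l memo hinv pos st _ (k+1) horig, memoExt_insert _ _ _ hm,
          by rw [PySem.Dict.get?_insert_self], ?_⟩
        intro g rest
        rw [Nat.add_comm 1 g, loopB]
        simp only [hm, if_pos h0]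
      · -- box over the edge
        cases Option.some.inj h
        refine ⟨1, memo.insert (pos, st) _, by omega,
          memoInv_insert n l memo hinv pos st _ (k+1) horig, memoExt_insert _ _ _ hm,
          by rw [PySem.Dict.get?_insert_self], ?_⟩
        intro g rest
        rw [Nat.add_comm 1 g, loopB]
        simp only [hm, if_neg h0, if_pos h1]
      · -- box exactly to the edge
        cases Option.some.inj h
        refine ⟨1, memo.insert (pos, st) _, by omega,
          memoInv_insert n l memo hinv pos st _ (k+1) horig, memoExt_insert _ _ _ hm,
          by rw [PySem.Dict.get?_insert_self], ?_⟩
        intro g rest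
        rw [Nat.add_comm 1 g, loopB]
        simp only [hm, if_neg h0, if_neg h1, if_pos h2]
      · -- general case: both children then the combine
        cases hr1 : delA n l k (pos + l + 1) (st - 1) with
        | none => rw [hr1] at h; simp at h
        | some r1 =>
        rw [hr1] at h
        cases hr2 : delA n l k (pos + 1) st with
        | none => rw [hr2] at h; simp at h
        | some r2 =>
        rw [hr2] at h
        have hvB : v = ((r1.filter (fun p => (((l.toNat : Int) + 1 + (p.length : Int)) == n - pos) &&
              (((l.toNat : Int) + ((PySem.List.count p 1 : Nat) : Int)) == 2 * st))).map
            (fun p => List.replicate l.toNat (1 : Int) ++ [0] ++ p)) ++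
          ((r2.filter (fun p => ((1 + (p.length : Int)) == n - pos) &&
              (((PySem.List.count p 1 : Nat) : Int) == 2 * st))).map
            (fun p => [0] ++ p)) := by
          rw [← combine_eq n l pos st r1 r2]
          exact (Option.some.inj h).symm
        subst hvB
        cases hg1 : memo.get? (pos + l + 1, st - 1) with
        | some w1 =>
          obtain ⟨k1, hk1⟩ := hinv _ _ _ hg1
          cases delA_uniq n l hk1 hr1
          cases hg2 : memo.get? (pos + 1, st) with
          | some w2 =>
            obtain ⟨k2, hk2⟩ := hinv _ _ _ hg2
            cases delA_uniq n l hk2 hr2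
            refine ⟨1, memo.insert (pos, st) _, by omega,
              memoInv_insert n l memo hinv pos st _ (k+1) horig, memoExt_insert _ _ _ hm,
              by rw [PySem.Dict.get?_insert_self], ?_⟩
            intro g rest
            rw [Nat.add_comm 1 g, loopB]
            simp only [hm, if_neg h0, if_neg h1, if_neg h2, hg1, hg2]
          | none =>
            obtain ⟨f2, memo2, hb2, hinv2, hext2, hget2, hrun2⟩ := ih (pos + 1) st memo r2 hinv hr2
            have hc1' := hext2 _ _ hg1
            cases hk2 : memo2.get? (pos, st) with
            | some w =>
              obtain ⟨k', hk'⟩ := hinv2 _ _ _ hk2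
              cases delA_uniq n l hk' horig
              refine ⟨f2 + 2, memo2, by omega, hinv2, hext2, hk2, ?_⟩
              intro g rest
              have e1 : f2 + 2 + g = (f2 + (1 + g)) + 1 := by omega
              rw [e1, loopB]
              simp only [hm, if_neg h0, if_neg h1, if_neg h2, hg1, hg2, Option.isSome_some,
                Option.isSome_none, Bool.false_eq_true, if_true, if_false,
                List.nil_append, List.singleton_append]
              rw [hrun2 (1 + g) ((pos, st) :: rest), Nat.add_comm 1 g, loopB]
              simp only [hk2]
            | none =>
              refine ⟨f2 + 2, memo2.insert (pos, st) _, by omega,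
                memoInv_insert n l memo2 hinv2 pos st _ (k+1) horig,
                memoExt_trans hext2 (memoExt_insert _ _ _ hk2),
                by rw [PySem.Dict.get?_insert_self], ?_⟩
              intro g rest
              have e1 : f2 + 2 + g = (f2 + (1 + g)) + 1 := by omega
              rw [e1, loopB]
              simp only [hm, if_neg h0, if_neg h1, if_neg h2, hg1, hg2, Option.isSome_some,
                Option.isSome_none, Bool.false_eq_true, if_true, if_false,
                List.nil_append, List.singleton_append]
              rw [hrun2 (1 + g) ((pos, st) :: rest), Nat.add_comm 1 g, loopB]
              simp only [hk2, if_neg h0, if_neg h1, if_neg h2, hc1', hget2]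
              simp only [List.singleton_append]
        | none =>
          obtain ⟨f1, memo1, hb1, hinv1, hext1, hget1, hrun1⟩ :=
            ih (pos + l + 1) (st - 1) memo r1 hinv hr1
          cases hg2 : memo.get? (pos + 1, st) with
          | some w2 =>
            obtain ⟨k2, hk2⟩ := hinv _ _ _ hg2
            cases delA_uniq n l hk2 hr2
            have hc2' := hext1 _ _ hg2
            cases hk2' : memo1.get? (pos, st) with
            | some w =>
              obtain ⟨k', hk'⟩ := hinv1 _ _ _ hk2'
              cases delA_uniq n l hk' horig
              refine ⟨f1 + 2, memo1, by omega, hinv1, hext1, hk2', ?_⟩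
              intro g rest
              have e1 : f1 + 2 + g = (f1 + (1 + g)) + 1 := by omega
              rw [e1, loopB]
              simp only [hm, if_neg h0, if_neg h1, if_neg h2, hg1, hg2, Option.isSome_some,
                Option.isSome_none, Bool.false_eq_true, if_true, if_false,
                List.singleton_append, List.append_nil]
              rw [hrun1 (1 + g) ((pos, st) :: rest), Nat.add_comm 1 g, loopB]
              simp only [hk2']
            | none =>
              refine ⟨f1 + 2, memo1.insert (pos, st) _, by omega,
                memoInv_insert n l memo1 hinv1 pos st _ (k+1) horig,
                memoExt_trans hext1 (memoExt_insert _ _ _ hk2'),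
                by rw [PySem.Dict.get?_insert_self], ?_⟩
              intro g rest
              have e1 : f1 + 2 + g = (f1 + (1 + g)) + 1 := by omega
              rw [e1, loopB]
              simp only [hm, if_neg h0, if_neg h1, if_neg h2, hg1, hg2, Option.isSome_some,
                Option.isSome_none, Bool.false_eq_true, if_true, if_false,
                List.singleton_append, List.append_nil]
              rw [hrun1 (1 + g) ((pos, st) :: rest), Nat.add_comm 1 g, loopB]
              simp only [hk2', if_neg h0, if_neg h1, if_neg h2, hget1, hc2']
              simp only [List.singleton_append]
          | none =>
            obtain ⟨f2, memo2, hb2, hinv2, hext2, hget2, hrun2⟩ :=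
              ih (pos + 1) st memo1 r2 hinv1 hr2
            have hc1' := hext2 _ _ hget1
            cases hk2 : memo2.get? (pos, st) with
            | some w =>
              obtain ⟨k', hk'⟩ := hinv2 _ _ _ hk2
              cases delA_uniq n l hk' horig
              refine ⟨f1 + f2 + 2, memo2, by omega, hinv2,
                memoExt_trans hext1 hext2, hk2, ?_⟩
              intro g rest
              have e1 : f1 + f2 + 2 + g = (f1 + (f2 + (1 + g))) + 1 := by omega
              rw [e1, loopB]
              simp only [hm, if_neg h0, if_neg h1, if_neg h2, hg1, hg2, Option.isSome_none, Bool.false_eq_true, if_false,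
                List.nil_append, List.cons_append]
              rw [hrun1 (f2 + (1 + g)) ((pos + 1, st) :: (pos, st) :: rest),
                hrun2 (1 + g) ((pos, st) :: rest), Nat.add_comm 1 g, loopB]
              simp only [hk2]
            | none =>
              refine ⟨f1 + f2 + 2, memo2.insert (pos, st) _, by omega,
                memoInv_insert n l memo2 hinv2 pos st _ (k+1) horig,
                memoExt_trans (memoExt_trans hext1 hext2) (memoExt_insert _ _ _ hk2),
                by rw [PySem.Dict.get?_insert_self], ?_⟩
              intro g rest
              have e1 : f1 + f2 + 2 + g = (f1 + (f2 + (1 + g))) + 1 := by omega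
              rw [e1, loopB]
              simp only [hm, if_neg h0, if_neg h1, if_neg h2, hg1, hg2, Option.isSome_none, Bool.false_eq_true, if_false,
                List.nil_append, List.cons_append]
              rw [hrun1 (f2 + (1 + g)) ((pos + 1, st) :: (pos, st) :: rest),
                hrun2 (1 + g) ((pos, st) :: rest), Nat.add_comm 1 g, loopB]
              simp only [hk2, if_neg h0, if_neg h1, if_neg h2, hc1', hget2]
              simp only [List.singleton_append]

theorem loopB_nil (n l : Int) (g : Nat) (memo : PySem.Dict (Int × Int) (List (List Int))) :
    loopB n l (g + 1) [] memo = some memo := by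
  rw [loopB]

-- fuel sufficiency on the terminating region (measure usable for any l when 0 ≤ l ∨ 0 ≤ st)
theorem delA_suff (n l : Int) : ∀ (k : Nat) (pos st : Int), (0 ≤ l ∨ 0 ≤ st) →
    st.toNat * (l.natAbs + 1) + (n - l - pos).toNat < k →
    ∃ v, delA n l k pos st = some v := by
  intro k
  induction k with
  | zero => intro pos st _ hk; omega
  | succ k ih =>
    intro pos st hls hk
    rw [delA]
    by_cases h0 : st = 0
    · rw [if_pos h0]; exact ⟨_, rfl⟩
    · rw [if_neg h0]
      by_cases h1 : n < pos + l
      · rw [if_pos h1]; exact ⟨_, rfl⟩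
      · rw [if_neg h1]
        by_cases h2 : pos + l = n
        · rw [if_pos h2]; exact ⟨_, rfl⟩
        · rw [if_neg h2]
          have hlt : pos + l < n := by omega
          have hls1 : 0 ≤ l ∨ 0 ≤ st - 1 := by
            rcases hls with h | h
            · exact Or.inl h
            · exact Or.inr (by omega)
          have hk1 : (st - 1).toNat * (l.natAbs + 1) + (n - l - (pos + l + 1)).toNat < k := by
            rcases hls with hll | hst
            · have hmul : (st - 1).toNat * (l.natAbs + 1) ≤ st.toNat * (l.natAbs + 1) :=
                Nat.mul_le_mul_right _ (by omega)
              omega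
            · have hst1 : st.toNat = (st - 1).toNat + 1 := by omega
              rw [hst1, Nat.succ_mul] at hk
              omega
          have hk2 : st.toNat * (l.natAbs + 1) + (n - l - (pos + 1)).toNat < k := by omega
          obtain ⟨v1, hv1⟩ := ih (pos + l + 1) (st - 1) hls1 hk1
          obtain ⟨v2, hv2⟩ := ih (pos + 1) st hls hk2
          rw [hv1, hv2]
          exact ⟨_, rfl⟩

-- fuel sufficiency for nonnegative box width: the recursion depth is bounded by the width left
theorem delA_suff2 (n l : Int) (hl : 0 ≤ l) : ∀ (k : Nat) (pos st : Int),
    (n - l - pos).toNat < k → ∃ v, delA n l k pos st = some v := by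
  intro k
  induction k with
  | zero => intro pos st hk; omega
  | succ k ih =>
    intro pos st hk
    rw [delA]
    by_cases h0 : st = 0
    · rw [if_pos h0]; exact ⟨_, rfl⟩
    · rw [if_neg h0]
      by_cases h1 : n < pos + l
      · rw [if_pos h1]; exact ⟨_, rfl⟩
      · rw [if_neg h1]
        by_cases h2 : pos + l = n
        · rw [if_pos h2]; exact ⟨_, rfl⟩
        · rw [if_neg h2]
          obtain ⟨v1, hv1⟩ := ih (pos + l + 1) (st - 1) (by omega)
          obtain ⟨v2, hv2⟩ := ih (pos + 1) st (by omega)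
          rw [hv1, hv2]
          exact ⟨_, rfl⟩

-- fuel sufficiency for negative box width: depth bounded by width left plus (st−1)·|l| extra retreats
theorem delA_suff_neg (n l : Int) (hl : l < 0) : ∀ (k : Nat) (pos st : Int), 0 ≤ st →
    (n - l - pos).toNat + (st - 1).toNat * l.natAbs + st.toNat < k →
    ∃ v, delA n l k pos st = some v := by
  intro k
  induction k with
  | zero => intro pos st _ hk; omega
  | succ k ih =>
    intro pos st hst hk
    rw [delA]
    by_cases h0 : st = 0
    · rw [if_pos h0]; exact ⟨_, rfl⟩
    · rw [if_neg h0]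
      by_cases h1 : n < pos + l
      · rw [if_pos h1]; exact ⟨_, rfl⟩
      · rw [if_neg h1]
        by_cases h2 : pos + l = n
        · rw [if_pos h2]; exact ⟨_, rfl⟩
        · rw [if_neg h2]
          have hst1 : 1 ≤ st := by omega
          have habs : (l.natAbs : Int) = -l := by omega
          -- child 2 (no box here)
          have hk2 : (n - l - (pos + 1)).toNat + (st - 1).toNat * l.natAbs + st.toNat < k := by
            omega
          obtain ⟨v2, hv2⟩ := ih (pos + 1) st hst hk2
          -- child 1 (box here): st − 1
          have hchild1 : ∃ v, delA n l k (pos + l + 1) (st - 1) = some v := by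
            by_cases hst2 : 2 ≤ st
            · have hmul : (st - 1).toNat * l.natAbs = (st - 1 - 1).toNat * l.natAbs + l.natAbs := by
                have e : (st - 1).toNat = (st - 1 - 1).toNat + 1 := by omega
                rw [e, Nat.succ_mul]
              exact ih (pos + l + 1) (st - 1) (by omega) (by omega)
            · -- st = 1: the child starts with st = 0 and returns in one step
              have hst0 : st - 1 = 0 := by omega
              have hkpos : 1 ≤ k := by omega
              obtain ⟨k', rfl⟩ := Nat.exists_eq_add_of_le hkpos
              rw [Nat.add_comm 1 k', hst0]
              exact ⟨_, by rw [delA, if_pos rfl]⟩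
          obtain ⟨v1, hv1⟩ := hchild1
          rw [hv1, hv2]
          exact ⟨_, rfl⟩

-- one step suffices when no box fits at all (and boxes remain)
theorem delA_corner (n m l : Int) (hm0 : ¬ m = 0) (hnl : n ≤ l) :
    ∃ v, delA n l 1 0 m = some v := by
  rw [show (1:Nat) = 0 + 1 from rfl, delA, if_neg hm0]
  by_cases h1 : n < 0 + l
  · rw [if_pos h1]; exact ⟨_, rfl⟩
  · rw [if_neg h1, if_pos (by omega)]; exact ⟨_, rfl⟩

-- on Pre_, 20000 units of fuel always suffice for the whole problem
theorem delA_pre (n m l : Int) (hpre : Pre_nageljni n m l) :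
    ∃ v, delA n l 20000 0 m = some v := by
  by_cases hm0 : m = 0
  · rw [show (20000:Nat) = 19999 + 1 from rfl, delA, if_pos hm0]; exact ⟨_, rfl⟩
  · obtain ⟨hp1, hp2⟩ := hpre
    rcases hp2 with h | h | ⟨hl, hd⟩ | ⟨hl, hm, hd⟩ | ⟨hl, hm, hd⟩
    · exact absurd h hm0
    · obtain ⟨v, hv⟩ := delA_corner n m l hm0 h
      exact ⟨v, delA_mono_le n l (show (1:Nat) ≤ 20000 by omega) 0 m v hv⟩
    · exact delA_suff2 n l hl 20000 0 m (by omega)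
    · exact delA_suff2 n l (by omega) 20000 0 m (by omega)
    · -- l < 0, 1 ≤ m, n − l + (m − 1)·(−l) ≤ 9994
      by_cases hnl : n ≤ l
      · obtain ⟨v, hv⟩ := delA_corner n m l hm0 hnl
        exact ⟨v, delA_mono_le n l (show (1:Nat) ≤ 20000 by omega) 0 m v hv⟩
      · apply delA_suff_neg n l hl 20000 0 m (by omega)
        have habs : (l.natAbs : Int) = -l := by omega
        have hmm : ((m - 1).toNat : Int) = m - 1 := by omega
        have hprod : (((m - 1).toNat * l.natAbs : Nat) : Int) = (m - 1) * (-l) := by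
          rw [Nat.cast_mul, hmm, habs]
        -- jointly (n − l) + (m−1)(−l) ≤ 9994, and m.toNat ≤ 9995
        have hsum : (n - l - 0).toNat + (m - 1).toNat * l.natAbs ≤ 9994 := by
          have h6 : ((((n - l - 0).toNat + (m - 1).toNat * l.natAbs : Nat)) : Int) ≤ 9994 := by
            rw [Nat.cast_add, hprod]
            omega
          exact_mod_cast h6
        have h3 : m.toNat ≤ 9995 := by
          by_cases hm2 : 2 ≤ m
          · have h4 : (m - 1 : Int) ≤ (m - 1) * (-l) := by nlinarith
            have h5 : (((m - 1).toNat * l.natAbs : Nat) : Int) ≤ 9994 := by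
              rw [hprod]
              omega
            omega
          · omega
        omega

-- ===== VERDICT (by name: the statement is the Claim_ definition above) =====
theorem nageljni_spec : Claim_equal_nageljni := by
  intro n m l hdom hpre
  unfold Spec_nageljni nageljni nageljni_alt
  obtain ⟨v, hv⟩ := delA_pre n m l hpre
  obtain ⟨f, memo', hb, -, -, hget, hrun⟩ :=
    loopB_run n l 20000 0 m PySem.Dict.empty v (memoInv_empty n l) hv
  have hb' : f + 3 ≤ 2 ^ 20002 := hb
  have hg : loopB n l (2 ^ 20002) [(0, m)] PySem.Dict.empty = some memo' := by
    have e : (2:Nat) ^ 20002 = f + (2 ^ 20002 - f - 1 + 1) := by omega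
    rw [e, hrun (2 ^ 20002 - f - 1 + 1) [], loopB_nil]
  have hA : delA n l (pvFuel n m l) 0 m = some v := by
    obtain ⟨hp1, -⟩ := hpre
    by_cases hP : 0 ≤ l ∨ 0 ≤ m
    · obtain ⟨v', hv'⟩ := delA_suff n l (pvFuel n m l) 0 m (hP.imp id id) (by unfold pvFuel; omega)
      cases delA_uniq n l hv' hv
      exact hv'
    · rw [not_or] at hP
      simp only [not_le] at hP
      obtain ⟨hl, hm⟩ := hP
      have hm0 : ¬ m = 0 := by omega
      have hnl : n ≤ l := by rcases hp1 with h | h | h; omega; omega; exact h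
      have hf : pvFuel n m l = 1 := by
        have e1 : m.toNat = 0 := by omega
        have e2 : (n - l).toNat = 0 := by omega
        unfold pvFuel; rw [e1, e2]; simp
      obtain ⟨v1, hv1⟩ := delA_corner n m l hm0 hnl
      cases delA_uniq n l (delA_mono_le n l (show (1:Nat) ≤ 20000 by omega) 0 m v1 hv1) hv
      rw [hf]
      exact hv1
  rw [hA, hg]
  exact (PySem.Dict.getD_of_get?_eq_some _ _ hget).symm
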